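-- pv_equiv track=rewrite | github.com/belenes/parser | avigliano_lexer_v3.py | ERROR_TOKEN_PARCIAL
-- ===== SOURCE A (Python) =====
-- def ERROR_TOKEN_PARCIAL(src):
--     s = 1
--     for c in src:
--         if s == 1 and c == ":":
--             s = 2
--         elif s == 1 and c == "!":
--             s = 2
--         elif s == 1 and c == "=":
--             s = 2
--         else:
--             s = -1
--             break
--     return s == 2
-- ===== SOURCE B (Python) =====
-- _SENTINEL = object()
--
-- def ERROR_TOKEN_PARCIAL(src):
--     it = iter(src)
--     first = next(it, _SENTINEL)
--     if first is _SENTINEL: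
--         return False
--     if next(it, _SENTINEL) is not _SENTINEL:
--         return False
--     return first in (":", "!", "=")
-- ===== Notes on version B (the rewrite author's own statement) =====
-- stated objective: simpler
-- what changed: Replaced the state-machine loop over all characters with a direct check that consumes at most two elements: the input must have exactly one element and it must be one of the three accepted punctuation characters.
import Mathlib
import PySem

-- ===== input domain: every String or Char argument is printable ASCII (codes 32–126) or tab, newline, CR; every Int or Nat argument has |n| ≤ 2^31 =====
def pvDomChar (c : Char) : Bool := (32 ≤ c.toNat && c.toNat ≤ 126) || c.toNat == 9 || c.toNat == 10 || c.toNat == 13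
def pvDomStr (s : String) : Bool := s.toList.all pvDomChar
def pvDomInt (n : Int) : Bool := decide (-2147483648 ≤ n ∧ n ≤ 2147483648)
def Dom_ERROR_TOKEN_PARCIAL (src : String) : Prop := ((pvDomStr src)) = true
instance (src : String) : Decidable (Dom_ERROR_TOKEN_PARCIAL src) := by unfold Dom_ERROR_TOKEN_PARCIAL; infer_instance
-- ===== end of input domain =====

-- B replaces A's state-machine loop with a direct check on at most the first two characters (objective: simpler).

-- ===== PORT A =====
-- the for-loop with early break, carrying the state s
def pvLoopA : List Char → Int → Int
  | [], s => s
  | c :: rest, s =>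
      if s == 1 && c == ':' then pvLoopA rest 2
      else if s == 1 && c == '!' then pvLoopA rest 2
      else if s == 1 && c == '=' then pvLoopA rest 2
      else (-1 : Int)   -- s = -1; break

def ERROR_TOKEN_PARCIAL (src : String) : Bool :=
  pvLoopA src.toList 1 == 2

-- ===== PORT B =====
def ERROR_TOKEN_PARCIAL_alt (src : String) : Bool :=
  match src.toList with
  | [c] => c == ':' || c == '!' || c == '='
  | _ => false

-- ===== PRECONDITION & SPEC =====
def Spec_ERROR_TOKEN_PARCIAL (src : String) (out : Bool) : Prop := out = ERROR_TOKEN_PARCIAL_alt src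
instance (src : String) (out : Bool) : Decidable (Spec_ERROR_TOKEN_PARCIAL src out) := by unfold Spec_ERROR_TOKEN_PARCIAL; infer_instance

-- ===== CLAIM (what is proved, stated in full; the proofs are below) =====
def Claim_equal_ERROR_TOKEN_PARCIAL : Prop := ∀ (src : String), Dom_ERROR_TOKEN_PARCIAL src → Spec_ERROR_TOKEN_PARCIAL src (ERROR_TOKEN_PARCIAL src)

-- ===== LEMMAS AND PROOFS =====
theorem pvLoopA_eq (l : List Char) :
    (pvLoopA l 1 == 2) = (match l with
      | [c] => c == ':' || c == '!' || c == '='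
      | _ => false) := by
  match l with
  | [] => rfl
  | [c] =>
      simp only [pvLoopA]
      by_cases h1 : c = ':' <;> by_cases h2 : c = '!' <;> by_cases h3 : c = '=' <;>
        simp [h1, h2, h3]
  | c :: d :: rest =>
      simp only [pvLoopA]
      by_cases h1 : c = ':' <;> by_cases h2 : c = '!' <;> by_cases h3 : c = '=' <;>
        simp [h1, h2, h3]

-- ===== VERDICT (by name: the statement is the Claim_ definition above) =====
theorem ERROR_TOKEN_PARCIAL_spec : Claim_equal_ERROR_TOKEN_PARCIAL := by
  intro src _
  unfold Spec_ERROR_TOKEN_PARCIAL ERROR_TOKEN_PARCIAL ERROR_TOKEN_PARCIAL_alt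
  exact pvLoopA_eq src.toList
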